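-- pv_equiv track=rewrite | github.com/dibin666/Aether | src/api/handlers/openai/reasoning_suffix.py | _split_reasoning_suffix
-- ===== SOURCE A (Python) =====
-- _SUPPORTED_EFFORT_SUFFIXES: tuple[str, ...] = ("xhigh", "medium", "high")
--
-- def _split_reasoning_suffix(model_name: str) -> tuple[str | None, str | None]:
--     for effort in _SUPPORTED_EFFORT_SUFFIXES:
--         suffix = f"-{effort}"
--         if model_name.endswith(suffix):
--             base_model = model_name[: -len(suffix)]
--             if base_model:
--                 return base_model, effort
--     return None, None
-- ===== SOURCE B (Python) =====
-- _EFFORTS = frozenset({"xhigh", "medium", "high"})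
--
-- def _split_reasoning_suffix(model_name):
--     base, sep, tail = model_name.rpartition("-")
--     if sep and tail in _EFFORTS and base:
--         return base, tail
--     return None, None
-- ===== Notes on version B (the rewrite author's own statement) =====
-- stated objective: simpler
-- what changed: Replaces the per-suffix endswith/slice loop by a single rpartition on the last hyphen plus one frozenset membership test on the tail.
import Mathlib
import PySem

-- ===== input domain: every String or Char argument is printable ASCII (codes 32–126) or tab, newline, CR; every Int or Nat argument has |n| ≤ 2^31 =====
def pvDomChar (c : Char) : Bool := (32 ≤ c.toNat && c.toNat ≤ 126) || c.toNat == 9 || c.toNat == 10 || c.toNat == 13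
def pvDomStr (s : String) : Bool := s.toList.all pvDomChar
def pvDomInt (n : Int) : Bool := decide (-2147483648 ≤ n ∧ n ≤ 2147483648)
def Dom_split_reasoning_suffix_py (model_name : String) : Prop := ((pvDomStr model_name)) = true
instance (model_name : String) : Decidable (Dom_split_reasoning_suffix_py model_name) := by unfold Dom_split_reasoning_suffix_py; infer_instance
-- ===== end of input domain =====

-- B replaces A's per-suffix endswith/slice loop by one rpartition on the last hyphen
-- plus a single set-membership test on the tail (objective: simpler).

-- ===== PORT A =====
-- _SUPPORTED_EFFORT_SUFFIXES = ("xhigh", "medium", "high")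
def pvSupportedEffortSuffixes : List String := ["xhigh", "medium", "high"]

-- the for-loop of A, with early return; falls through on empty base exactly as A does
def pvALoop (m : String) : List String → Option String × Option String
  | [] => (none, none)
  | eff :: rest =>
    let suffix : List Char := '-' :: eff.toList            -- f"-{effort}"
    if PySem.Chars.endswith m.toList suffix then
      let base := PySem.Chars.slice m.toList none (some (-(suffix.length : Int)))  -- model_name[:-len(suffix)]
      if base ≠ [] then (String.ofList base, some eff)
      else pvALoop m rest
    else pvALoop m rest

def split_reasoning_suffix_py (model_name : String) : Option String × Option String :=
  pvALoop model_name pvSupportedEffortSuffixes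

-- ===== PORT B =====
-- hand port of str.rpartition(sep) for a single-character sep (exact there):
-- split at the LAST occurrence of sep; no occurrence → ("", "", s)
def pvRPartition (cs : List Char) (sep : Char) : List Char × List Char × List Char :=
  match (cs.reverse.dropWhile (· ≠ sep)) with
  | [] => ([], [], cs)
  | _ :: bs => (bs.reverse, [sep], (cs.reverse.takeWhile (· ≠ sep)).reverse)

def pvEfforts : PySem.Set String := PySem.Set.ofList ["xhigh", "medium", "high"]

def split_reasoning_suffix_py_alt (model_name : String) : Option String × Option String :=
  let p := pvRPartition model_name.toList '-'
  if p.2.1 ≠ [] ∧ String.ofList p.2.2 ∈ pvEfforts ∧ p.1 ≠ [] then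
    (some (String.ofList p.1), some (String.ofList p.2.2))
  else (none, none)

-- ===== PRECONDITION & SPEC =====
def Spec_split_reasoning_suffix_py (model_name : String) (out : Option String × Option String) : Prop := out = split_reasoning_suffix_py_alt model_name
instance (model_name : String) (out : Option String × Option String) : Decidable (Spec_split_reasoning_suffix_py model_name out) := by unfold Spec_split_reasoning_suffix_py; infer_instance

-- ===== CLAIM (what is proved, stated in full; the proofs are below) =====
def Claim_equal_split_reasoning_suffix_py : Prop := ∀ (model_name : String), Dom_split_reasoning_suffix_py model_name → Spec_split_reasoning_suffix_py model_name (split_reasoning_suffix_py model_name)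

-- ===== LEMMAS AND PROOFS =====

-- A's "model_name.endswith('-' + eff)" characterised through the reversed list:
-- it holds iff the run of non-hyphens at the end of the name is exactly eff (a hyphen-free
-- effort) and a hyphen follows it.
theorem endswith_iff_rpart (cs eff : List Char) (hh : '-' ∉ eff) :
    PySem.Chars.endswith cs ('-' :: eff) = true ↔
      cs.reverse.takeWhile (fun x => !decide (x = '-')) = eff.reverse ∧
      cs.reverse.dropWhile (fun x => !decide (x = '-')) ≠ [] := by
  rw [PySem.Chars.endswith_iff]
  constructor
  · rintro ⟨pre, rfl⟩
    have hpos : ∀ x ∈ eff.reverse, (!decide (x = '-')) = true := by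
      intro x hx; rw [List.mem_reverse] at hx
      simp only [Bool.not_eq_eq_eq_not, Bool.not_true, decide_eq_false_iff_not]
      exact fun h => hh (h ▸ hx)
    constructor
    · rw [List.reverse_append, List.reverse_cons, List.append_assoc,
        List.takeWhile_append_of_pos hpos]
      simp
    · rw [List.reverse_append, List.reverse_cons, List.append_assoc,
        List.dropWhile_append_of_pos hpos]
      simp
  · rintro ⟨ht, hd⟩
    rcases hne : cs.reverse.dropWhile (fun x => !decide (x = '-')) with _ | ⟨d, bs⟩
    · exact absurd hne hd
    · have hdh : d = '-' := by
        have := List.head?_dropWhile_not (fun x => !decide (x = '-')) cs.reverse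
        rw [hne] at this
        simpa using this
      subst hdh
      refine ⟨bs.reverse, ?_⟩
      have hsplit : cs.reverse.takeWhile (fun x => !decide (x = '-')) ++
          cs.reverse.dropWhile (fun x => !decide (x = '-')) = cs.reverse :=
        List.takeWhile_append_dropWhile
      rw [ht, hne] at hsplit
      have hc : cs = bs.reverse ++ '-' :: eff := by
        calc cs = cs.reverse.reverse := (List.reverse_reverse cs).symm
          _ = (eff.reverse ++ '-' :: bs).reverse := by rw [hsplit]
          _ = bs.reverse ++ '-' :: eff := by simp
      exact hc.symm

-- A's slice model_name[:-(len eff + 1)] equals the base of the split, once the name is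
-- known to end in '-' :: eff.
theorem slice_of_split (bs eff : List Char) :
    PySem.Chars.slice (bs.reverse ++ '-' :: eff) none (some (-((eff.length + 1 : Nat) : Int)))
      = bs.reverse := by
  rw [PySem.Chars.slice_eq_listSlice]
  rw [PySem.List.slice_to_neg_natCast _ _ (Nat.succ_pos eff.length)]
  have hlen : (bs.reverse ++ '-' :: eff).length - (eff.length + 1) = bs.reverse.length := by
    simp
  rw [hlen, List.take_left]

theorem split_reasoning_suffix_py_spec : Claim_equal_split_reasoning_suffix_py := by
  intro m _
  unfold Spec_split_reasoning_suffix_py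
  have hx := endswith_iff_rpart m.toList ['x','h','i','g','h'] (by decide)
  have hme := endswith_iff_rpart m.toList ['m','e','d','i','u','m'] (by decide)
  have hhi := endswith_iff_rpart m.toList ['h','i','g','h'] (by decide)
  rcases hd : List.dropWhile (fun x => !decide (x = '-')) m.toList.reverse with _ | ⟨c, bs⟩
  · have fx : PySem.Chars.endswith m.toList ['-','x','h','i','g','h'] = false := by
      rw [Bool.eq_false_iff]; intro h; exact (hx.mp h).2 hd
    have fme : PySem.Chars.endswith m.toList ['-','m','e','d','i','u','m'] = false := by
      rw [Bool.eq_false_iff]; intro h; exact (hme.mp h).2 hd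
    have fhi : PySem.Chars.endswith m.toList ['-','h','i','g','h'] = false := by
      rw [Bool.eq_false_iff]; intro h; exact (hhi.mp h).2 hd
    simp [split_reasoning_suffix_py, pvALoop, pvSupportedEffortSuffixes, fx, fme, fhi,
          split_reasoning_suffix_py_alt, pvRPartition, hd]
  · have hc : c = '-' := by
      have h0 := List.head?_dropWhile_not (fun x => !decide (x = '-')) m.toList.reverse
      rw [hd] at h0; simpa using h0
    subst hc
    have hsplit : m.toList = bs.reverse ++ '-' :: (List.takeWhile (fun x => !decide (x = '-')) m.toList.reverse).reverse := by
      have h1 : List.takeWhile (fun x => !decide (x = '-')) m.toList.reverse ++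
          List.dropWhile (fun x => !decide (x = '-')) m.toList.reverse = m.toList.reverse :=
        List.takeWhile_append_dropWhile
      rw [hd] at h1
      calc m.toList = m.toList.reverse.reverse := (List.reverse_reverse _).symm
        _ = (List.takeWhile (fun x => !decide (x = '-')) m.toList.reverse ++ '-' :: bs).reverse := by rw [h1]
        _ = _ := by simp
    by_cases h1 : List.takeWhile (fun x => !decide (x = '-')) m.toList.reverse = ['h','g','i','h','x']
    · have ex : PySem.Chars.endswith m.toList ('-' :: ['x','h','i','g','h']) = true :=
        hx.mpr ⟨by rw [h1]; decide, by rw [hd]; simp⟩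
      have fme : PySem.Chars.endswith m.toList ('-' :: ['m','e','d','i','u','m']) = false := by
        rw [Bool.eq_false_iff]; intro h
        have hq := (hme.mp h).1
        rw [h1] at hq; exact absurd hq (by decide)
      have fhi : PySem.Chars.endswith m.toList ('-' :: ['h','i','g','h']) = false := by
        rw [Bool.eq_false_iff]; intro h
        have hq := (hhi.mp h).1
        rw [h1] at hq; exact absurd hq (by decide)
      have hm2 : m.toList = bs.reverse ++ '-' :: ['x','h','i','g','h'] := by
        rw [hsplit, h1]; rfl
      have hs : PySem.List.slice m.toList none (some (-6)) = bs.reverse := by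
        rw [hm2]
        have h3 := slice_of_split bs ['x','h','i','g','h']
        simpa using h3
      simp [split_reasoning_suffix_py, pvALoop, pvSupportedEffortSuffixes, ex, fme, fhi, hs,
            split_reasoning_suffix_py_alt, pvRPartition, hd, h1, pvEfforts]
    by_cases h2 : List.takeWhile (fun x => !decide (x = '-')) m.toList.reverse = ['m','u','i','d','e','m']
    · have ex : PySem.Chars.endswith m.toList ('-' :: ['m','e','d','i','u','m']) = true :=
        hme.mpr ⟨by rw [h2]; decide, by rw [hd]; simp⟩
      have fx2 : PySem.Chars.endswith m.toList ('-' :: ['x','h','i','g','h']) = false := by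
        rw [Bool.eq_false_iff]; intro h
        have hq := (hx.mp h).1
        rw [h2] at hq; exact absurd hq (by decide)
      have fhi2 : PySem.Chars.endswith m.toList ('-' :: ['h','i','g','h']) = false := by
        rw [Bool.eq_false_iff]; intro h
        have hq := (hhi.mp h).1
        rw [h2] at hq; exact absurd hq (by decide)
      have hm2 : m.toList = bs.reverse ++ '-' :: ['m','e','d','i','u','m'] := by
        rw [hsplit, h2]; rfl
      have hs : PySem.List.slice m.toList none (some (-7)) = bs.reverse := by
        rw [hm2]
        have h3 := slice_of_split bs ['m','e','d','i','u','m']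
        simpa using h3
      simp [split_reasoning_suffix_py, pvALoop, pvSupportedEffortSuffixes, ex, fx2, fhi2, hs,
            split_reasoning_suffix_py_alt, pvRPartition, hd, h2, pvEfforts]
    by_cases h3 : List.takeWhile (fun x => !decide (x = '-')) m.toList.reverse = ['h','g','i','h']
    · have ex : PySem.Chars.endswith m.toList ('-' :: ['h','i','g','h']) = true :=
        hhi.mpr ⟨by rw [h3]; decide, by rw [hd]; simp⟩
      have fx3 : PySem.Chars.endswith m.toList ('-' :: ['x','h','i','g','h']) = false := by
        rw [Bool.eq_false_iff]; intro h
        have hq := (hx.mp h).1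
        rw [h3] at hq; exact absurd hq (by decide)
      have fme3 : PySem.Chars.endswith m.toList ('-' :: ['m','e','d','i','u','m']) = false := by
        rw [Bool.eq_false_iff]; intro h
        have hq := (hme.mp h).1
        rw [h3] at hq; exact absurd hq (by decide)
      have hm2 : m.toList = bs.reverse ++ '-' :: ['h','i','g','h'] := by
        rw [hsplit, h3]; rfl
      have hs : PySem.List.slice m.toList none (some (-5)) = bs.reverse := by
        rw [hm2]
        have h3 := slice_of_split bs ['h','i','g','h']
        simpa using h3
      simp [split_reasoning_suffix_py, pvALoop, pvSupportedEffortSuffixes, ex, fx3, fme3, hs,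
            split_reasoning_suffix_py_alt, pvRPartition, hd, h3, pvEfforts]
    -- tail is none of the three efforts: both sides return (none, none)
    have fx : PySem.Chars.endswith m.toList ('-' :: ['x','h','i','g','h']) = false := by
      rw [Bool.eq_false_iff]; intro h; exact h1 (by have := (hx.mp h).1; simpa using this)
    have fme : PySem.Chars.endswith m.toList ('-' :: ['m','e','d','i','u','m']) = false := by
      rw [Bool.eq_false_iff]; intro h; exact h2 (by have := (hme.mp h).1; simpa using this)
    have fhi : PySem.Chars.endswith m.toList ('-' :: ['h','i','g','h']) = false := by
      rw [Bool.eq_false_iff]; intro h; exact h3 (by have := (hhi.mp h).1; simpa using this)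
    have hmem : String.ofList (List.takeWhile (fun x => !decide (x = '-')) m.toList.reverse).reverse ∉ pvEfforts := by
      intro hmem
      simp only [pvEfforts, PySem.Set.mem_ofList, List.mem_cons, List.not_mem_nil, or_false] at hmem
      rcases hmem with h | h | h
      · apply h1
        have h4 := congrArg String.toList h; simp at h4
        rw [← List.reverse_reverse (List.takeWhile (fun x => !decide (x = '-')) m.toList.reverse), h4]; rfl
      · apply h2
        have h4 := congrArg String.toList h; simp at h4
        rw [← List.reverse_reverse (List.takeWhile (fun x => !decide (x = '-')) m.toList.reverse), h4]; rfl
      · apply h3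
        have h4 := congrArg String.toList h; simp at h4
        rw [← List.reverse_reverse (List.takeWhile (fun x => !decide (x = '-')) m.toList.reverse), h4]; rfl
    simp [split_reasoning_suffix_py, pvALoop, pvSupportedEffortSuffixes, fx, fme, fhi,
          split_reasoning_suffix_py_alt, pvRPartition, hd, hmem]
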